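-- pv_equiv track=rewrite | github.com/Yahya20051937/Calculator | math_calcul2/helping_function.py | get_sub_array2
-- ===== SOURCE A (Python) =====
-- def get_sub_array2(array, index):
--     signs = ('+', '-')
--     index_counter = -1
--     for element in array[index + 1:]:
--         index_counter += 1
--         if element in signs:
--             sub_array2 = array[index + 1:index_counter + index + 1]
--
--             return sub_array2, index_counter
--
--     return None, None
-- ===== SOURCE B (Python) =====
-- def get_sub_array2(array, index):
--     sub = array[index + 1:]
--     hits = [sub.index(s) for s in ('+', '-') if s in sub]
--     if not hits:
--         return None, None
--     j = min(hits)
--     return array[index + 1:index + 1 + j], j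
-- ===== Notes on version B (the rewrite author's own statement) =====
-- stated objective: alternative
-- what changed: Replaces A's manual counter loop over the tail with per-sign first-occurrence searches combined by min, then one slice of the original array.
import Mathlib
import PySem

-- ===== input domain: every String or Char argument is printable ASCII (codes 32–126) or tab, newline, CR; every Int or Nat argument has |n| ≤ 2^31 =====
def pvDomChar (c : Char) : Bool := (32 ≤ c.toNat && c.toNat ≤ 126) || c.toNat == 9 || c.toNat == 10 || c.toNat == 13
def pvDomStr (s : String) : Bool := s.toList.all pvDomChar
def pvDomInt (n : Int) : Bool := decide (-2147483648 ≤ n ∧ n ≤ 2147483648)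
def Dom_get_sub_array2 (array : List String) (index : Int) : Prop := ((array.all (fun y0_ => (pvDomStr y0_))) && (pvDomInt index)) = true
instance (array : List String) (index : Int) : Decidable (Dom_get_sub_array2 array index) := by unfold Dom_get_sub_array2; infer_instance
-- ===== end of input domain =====

-- B replaces A's single manual counter loop by per-sign first-occurrence searches combined with min; same cost, different decomposition.

-- ===== PORT A =====
-- the for-loop over array[index+1:] with the running counter
def get_sub_array2_loop (array : List String) (index : Int) : List String → Int → Option (List String) × Option Int
  | [], _ => (none, none)
  | e :: rest, ic =>
      let ic' := ic + 1
      if e = "+" ∨ e = "-" then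
        (some (PySem.List.slice array (some (index + 1)) (some (ic' + index + 1))), some ic')
      else
        get_sub_array2_loop array index rest ic'

def get_sub_array2 (array : List String) (index : Int) : Option (List String) × Option Int :=
  get_sub_array2_loop array index (PySem.List.slice array (some (index + 1)) none) (-1)

-- ===== PORT B =====
def get_sub_array2_alt (array : List String) (index : Int) : Option (List String) × Option Int :=
  let sub := PySem.List.slice array (some (index + 1)) none
  let hits := (["+", "-"] : List String).filterMap (fun s => PySem.List.index? sub s)
  match PySem.List.min? hits (fun x => x) with
  | none => (none, none)
  | some j => (some (PySem.List.slice array (some (index + 1)) (some (index + 1 + (j : Int)))), some (j : Int))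

-- ===== PRECONDITION & SPEC =====
def Spec_get_sub_array2 (array : List String) (index : Int) (out : Option (List String) × Option Int) : Prop := out = get_sub_array2_alt array index
instance (array : List String) (index : Int) (out : Option (List String) × Option Int) : Decidable (Spec_get_sub_array2 array index out) := by unfold Spec_get_sub_array2; infer_instance

-- ===== CLAIM (what is proved, stated in full; the proofs are below) =====
def Claim_equal_get_sub_array2 : Prop := ∀ (array : List String) (index : Int), Dom_get_sub_array2 array index → Spec_get_sub_array2 array index (get_sub_array2 array index)

-- ===== LEMMAS AND PROOFS =====

-- A's loop returns according to the first position of a sign in the tail it walks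
lemma loopA_eq_findIdx? (array : List String) (index : Int) (sub : List String) (ic : Int) :
    get_sub_array2_loop array index sub ic =
      match sub.findIdx? (fun e => e == "+" || e == "-") with
      | none => (none, none)
      | some k => (some (PySem.List.slice array (some (index + 1)) (some (ic + 1 + (k : Int) + index + 1))),
                   some (ic + 1 + (k : Int))) := by
  induction sub generalizing ic with
  | nil => simp [get_sub_array2_loop]
  | cons e rest ih =>
      by_cases h : e = "+" ∨ e = "-"
      · have hb : (e == "+" || e == "-") = true := by
          rcases h with h | h <;> simp [h]
        simp [get_sub_array2_loop, h, List.findIdx?_cons, hb]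
      · have hb : (e == "+" || e == "-") = false := by
          push Not at h
          simp [h.1, h.2]
        simp only [get_sub_array2_loop, if_neg h, List.findIdx?_cons, hb, Bool.false_eq_true,
          if_false, ih]
        cases hf : rest.findIdx? (fun e => e == "+" || e == "-") with
        | none => simp
        | some k =>
            simp only [Option.map_some, Prod.mk.injEq, Option.some.injEq]
            refine ⟨?_, by push_cast; ring⟩
            congr 2
            push_cast
            ring

-- min over natural numbers commutes with the +1 shift
lemma foldl_min_succ (t : List Nat) (x : Nat) :
    (t.map (fun n => n + 1)).foldl min (x + 1) = t.foldl min x + 1 := by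
  induction t generalizing x with
  | nil => simp
  | cons a t ih => simp [List.foldl, Nat.succ_min_succ, ih]

lemma min?_map_succ (l : List Nat) :
    PySem.List.min? (l.map (fun n => n + 1)) (fun x => x) =
      (PySem.List.min? l (fun x => x)).map (fun n => n + 1) := by
  cases l with
  | nil => simp [PySem.List.min?]
  | cons x t => simp [PySem.List.min?_id_cons, foldl_min_succ]

-- the minimum of the per-sign first occurrences is the first position of any sign
lemma min_hits_eq_findIdx? (sub : List String) :
    PySem.List.min? ((["+", "-"] : List String).filterMap (fun s => PySem.List.index? sub s)) (fun x => x) =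
      sub.findIdx? (fun e => e == "+" || e == "-") := by
  induction sub with
  | nil => simp [PySem.List.index?, PySem.List.min?]
  | cons e rest ih =>
      by_cases hp : e = "+"
      · subst hp
        have h0 : PySem.List.index? ("+" :: rest) "+" = some 0 := PySem.List.index?_cons_self _ _
        have h2 : PySem.List.index? ("+" :: rest) "-" = (PySem.List.index? rest "-").map (· + 1) :=
          PySem.List.index?_cons_of_ne rest (by decide)
        have hf : ("+" :: rest).findIdx? (fun e => e == "+" || e == "-") = some 0 := by
          simp [List.findIdx?_cons]
        rw [hf]
        simp only [List.filterMap_cons, List.filterMap_nil, h0, h2]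
        cases h : PySem.List.index? rest "-" with
        | none => simp [PySem.List.min?_id_cons]
        | some k => simp [PySem.List.min?_id_cons, List.foldl]
      · by_cases hm : e = "-"
        · subst hm
          have h0 : PySem.List.index? ("-" :: rest) "-" = some 0 := PySem.List.index?_cons_self _ _
          have h2 : PySem.List.index? ("-" :: rest) "+" = (PySem.List.index? rest "+").map (· + 1) :=
            PySem.List.index?_cons_of_ne rest (by decide)
          have hf : ("-" :: rest).findIdx? (fun e => e == "+" || e == "-") = some 0 := by
            simp [List.findIdx?_cons]
          rw [hf]
          simp only [List.filterMap_cons, List.filterMap_nil, h0, h2]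
          cases h : PySem.List.index? rest "+" with
          | none => simp [PySem.List.min?_id_cons]
          | some k => simp [PySem.List.min?_id_cons, List.foldl]
        · have hb : (e == "+" || e == "-") = false := by simp [hp, hm]
          have e1 : PySem.List.index? (e :: rest) "+" = (PySem.List.index? rest "+").map (· + 1) :=
            PySem.List.index?_cons_of_ne rest hp
          have e2 : PySem.List.index? (e :: rest) "-" = (PySem.List.index? rest "-").map (· + 1) :=
            PySem.List.index?_cons_of_ne rest hm
          have hfm : (["+", "-"] : List String).filterMap (fun s => PySem.List.index? (e :: rest) s) =
              ((["+", "-"] : List String).filterMap (fun s => PySem.List.index? rest s)).map (fun n => n + 1) := by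
            simp only [List.filterMap_cons, List.filterMap_nil, e1, e2]
            cases PySem.List.index? rest "+" <;> cases PySem.List.index? rest "-" <;> simp
          rw [hfm, min?_map_succ, ih, List.findIdx?_cons, hb]
          simp

-- ===== VERDICT (by name: the statement is the Claim_ definition above) =====
theorem get_sub_array2_spec : Claim_equal_get_sub_array2 := by
  intro array index _
  unfold Spec_get_sub_array2 get_sub_array2 get_sub_array2_alt
  simp only [loopA_eq_findIdx?, min_hits_eq_findIdx?]
  cases h : (PySem.List.slice array (some (index + 1)) none).findIdx? (fun e => e == "+" || e == "-") with
  | none => simp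
  | some k =>
      simp only [Prod.mk.injEq, Option.some.injEq]
      refine ⟨?_, by push_cast; ring⟩
      congr 2
      push_cast
      ring
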